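-- pv_equiv track=rewrite | github.com/Remaker-Digital/groundtruth-kb | src/groundtruth_kb/db.py | _auto_detect_spec_type
-- ===== SOURCE A (Python) =====
-- def _auto_detect_spec_type(spec_id: str, declared_type: str) -> str:
--     """Auto-detect spec type from ID prefix when declared as default 'requirement'."""
--     if declared_type != "requirement":
--         return declared_type
--     prefix_map = {
--         "GOV-": "governance",
--         "PB-": "protected_behavior",
--         "ADR-": "architecture_decision",
--         "DCL-": "design_constraint",
--     }
--     for prefix, spec_type in prefix_map.items():
--         if spec_id.startswith(prefix):
--             return spec_type
--     return declared_type
-- ===== SOURCE B (Python) =====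
-- def _auto_detect_spec_type(spec_id: str, declared_type: str) -> str:
--     """Auto-detect spec type from ID prefix when declared as default 'requirement'."""
--     if declared_type != "requirement":
--         return declared_type
--     i = spec_id.find("-")
--     if i == -1:
--         return declared_type
--     prefix_map = {
--         "GOV-": "governance",
--         "PB-": "protected_behavior",
--         "ADR-": "architecture_decision",
--         "DCL-": "design_constraint",
--     }
--     return prefix_map.get(spec_id[:i + 1], declared_type)
-- ===== Notes on version B (the rewrite author's own statement) =====
-- stated objective: simpler
-- what changed: Instead of scanning the four prefixes with startswith, B locates the first hyphen once, slices the id up to and including it, and does one keyed dict lookup with the declared type as default.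
import Mathlib
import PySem

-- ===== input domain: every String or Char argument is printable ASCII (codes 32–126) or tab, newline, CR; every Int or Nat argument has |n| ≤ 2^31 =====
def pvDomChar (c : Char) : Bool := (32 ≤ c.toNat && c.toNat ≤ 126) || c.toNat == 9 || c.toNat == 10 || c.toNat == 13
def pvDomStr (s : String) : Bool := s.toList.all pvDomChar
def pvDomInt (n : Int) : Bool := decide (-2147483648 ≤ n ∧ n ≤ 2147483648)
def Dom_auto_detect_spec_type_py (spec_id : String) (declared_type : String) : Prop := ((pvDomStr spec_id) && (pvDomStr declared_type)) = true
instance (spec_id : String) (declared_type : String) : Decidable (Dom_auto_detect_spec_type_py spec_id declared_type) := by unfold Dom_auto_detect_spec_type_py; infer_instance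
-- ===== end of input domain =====

-- B replaces A's startswith scan over the prefix map by locating the first hyphen once and doing a single keyed lookup on the sliced prefix (objective: simpler).


-- ===== PORT A =====
-- the `for prefix, spec_type in prefix_map.items()` loop over the 4-entry literal dict is unrolled in declaration order
def auto_detect_spec_type_py (spec_id : String) (declared_type : String) : String :=
  if declared_type ≠ "requirement" then declared_type
  else if PySem.Str.startswith spec_id "GOV-" then "governance"
  else if PySem.Str.startswith spec_id "PB-" then "protected_behavior"
  else if PySem.Str.startswith spec_id "ADR-" then "architecture_decision"
  else if PySem.Str.startswith spec_id "DCL-" then "design_constraint"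
  else declared_type

-- ===== PORT B =====
def auto_detect_spec_type_py_alt (spec_id : String) (declared_type : String) : String :=
  if declared_type ≠ "requirement" then declared_type
  else
    let i : Int := PySem.Str.find spec_id "-"
    if i == -1 then declared_type
    else
      let prefix_map : PySem.Dict String String := PySem.Dict.ofList
        [("GOV-", "governance"), ("PB-", "protected_behavior"),
         ("ADR-", "architecture_decision"), ("DCL-", "design_constraint")]
      prefix_map.getD (PySem.Str.slice spec_id none (some (i + 1))) declared_type

-- ===== PRECONDITION & SPEC =====
def Spec_auto_detect_spec_type_py (spec_id : String) (declared_type : String) (out : String) : Prop := out = auto_detect_spec_type_py_alt spec_id declared_type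
instance (spec_id : String) (declared_type : String) (out : String) : Decidable (Spec_auto_detect_spec_type_py spec_id declared_type out) := by unfold Spec_auto_detect_spec_type_py; infer_instance

-- ===== CLAIM (what is proved, stated in full; the proofs are below) =====
def Claim_equal_auto_detect_spec_type_py : Prop := ∀ (spec_id : String) (declared_type : String), Dom_auto_detect_spec_type_py spec_id declared_type → Spec_auto_detect_spec_type_py spec_id declared_type (auto_detect_spec_type_py spec_id declared_type)

-- ===== LEMMAS AND PROOFS =====

-- a singleton list is a prefix of `l.drop i` exactly when `l[i]? = some c`
theorem pv_singleton_prefix_drop (l : List Char) (i : Nat) (c : Char) :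
    [c] <+: l.drop i ↔ l[i]? = some c := by
  constructor
  · rintro ⟨t, ht⟩
    have h0 : (l.drop i)[0]? = some c := by rw [← ht]; rfl
    simpa [List.getElem?_drop] using h0
  · intro h
    obtain ⟨hi, hc⟩ := List.getElem?_eq_some_iff.mp h
    exact ⟨l.drop (i + 1), by simp [← hc, List.getElem_cons_drop]⟩

-- when the string contains no hyphen, no hyphen-terminated prefix can match
theorem pv_no_hyphen_no_prefix (l q : List Char)
    (h : PySem.Chars.find l ['-'] = -1) : ¬ (q ++ ['-']) <+: l := by
  intro hp
  have hni : ¬ (['-'] <:+: l) := (PySem.Chars.find_eq_neg_one_iff l ['-']).mp h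
  exact hni (List.IsInfix.trans ⟨q, [], by simp⟩ hp.isInfix)

-- with first hyphen at index f and hyphen-free q: (q ++ "-") <+: l ↔ l.take (f+1) = q ++ "-"
theorem pv_prefix_iff_key (l q : List Char) (hq : '-' ∉ q)
    (hf : 0 ≤ PySem.Chars.find l ['-']) :
    (q ++ ['-']) <+: l ↔ l.take ((PySem.Chars.find l ['-']).toNat + 1) = q ++ ['-'] := by
  obtain ⟨hpre, hmin⟩ := PySem.Chars.find_spec (s := l) (sub := ['-']) hf
  set f : Nat := (PySem.Chars.find l ['-']).toNat with hfdef
  constructor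
  · rintro hp
    obtain ⟨t, ht⟩ := hp
    have hdropq : ['-'] <+: l.drop q.length := by
      refine (pv_singleton_prefix_drop l q.length '-').mpr ?_
      rw [← ht]; simp
    have hle : f ≤ q.length := by
      by_contra hlt
      exact (hmin q.length (Nat.lt_of_not_le hlt)) hdropq
    have hfq : f = q.length := by
      rcases Nat.lt_or_ge f q.length with hlt | hge
      · exfalso
        have hlc : l[f]? = some '-' := (pv_singleton_prefix_drop l f '-').mp hpre
        have hqc : q[f]? = some '-' := by
          rw [← ht, List.append_assoc] at hlc
          rwa [List.getElem?_append_left hlt] at hlc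
        exact hq (List.mem_of_getElem? hqc)
      · omega
    rw [← ht, hfq, List.append_assoc]
    simp [List.take_append]
  · intro hk
    exact hk ▸ List.take_prefix _ l

-- the literal dict evaluates to its association list (keys distinct)
theorem pv_prefix_map_eq_mk :
    (PySem.Dict.ofList
      [("GOV-", "governance"), ("PB-", "protected_behavior"),
       ("ADR-", "architecture_decision"), ("DCL-", "design_constraint")] : PySem.Dict String String) =
    PySem.Dict.mk
      [("GOV-", "governance"), ("PB-", "protected_behavior"),
       ("ADR-", "architecture_decision"), ("DCL-", "design_constraint")] := by decide

-- getD on the literal 4-entry dict is the if-chain on the key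
theorem pv_getD_prefix_map (key d : String) :
    (PySem.Dict.ofList
      [("GOV-", "governance"), ("PB-", "protected_behavior"),
       ("ADR-", "architecture_decision"), ("DCL-", "design_constraint")]).getD key d =
    if key = "GOV-" then "governance"
    else if key = "PB-" then "protected_behavior"
    else if key = "ADR-" then "architecture_decision"
    else if key = "DCL-" then "design_constraint"
    else d := by
  rw [pv_prefix_map_eq_mk]
  by_cases h1 : key = "GOV-"
  · subst h1; simp [PySem.Dict.getD_eq_get?_getD, PySem.Dict.get?_mk_cons]
  by_cases h2 : key = "PB-"
  · subst h2; simp [PySem.Dict.getD_eq_get?_getD, PySem.Dict.get?_mk_cons]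
  by_cases h3 : key = "ADR-"
  · subst h3; simp [PySem.Dict.getD_eq_get?_getD, PySem.Dict.get?_mk_cons]
  by_cases h4 : key = "DCL-"
  · subst h4; simp [PySem.Dict.getD_eq_get?_getD, PySem.Dict.get?_mk_cons]
  simp [PySem.Dict.getD_eq_get?_getD, PySem.Dict.get?,
    h1, h2, h3, h4, Ne.symm h1, Ne.symm h2, Ne.symm h3, Ne.symm h4]

-- s[:i+1] on the string is take (i+1) on its characters, for 0 ≤ i
theorem pv_slice_toList (s : String) (i : Int) (hi : 0 ≤ i) :
    (PySem.Str.slice s none (some (i + 1))).toList = s.toList.take (i.toNat + 1) := by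
  have h : i + 1 = ((i.toNat + 1 : Nat) : Int) := by omega
  rw [h, PySem.Str.toList_slice, PySem.Chars.slice_eq_listSlice, PySem.List.slice_to_natCast]

-- when a hyphen is present: startswith on a hyphen-terminated prefix ↔ the sliced key equals it
theorem pv_main_iff (s P : String) (q : List Char) (hq : '-' ∉ q)
    (hP : P.toList = q ++ ['-'])
    (hf : 0 ≤ PySem.Chars.find s.toList ['-']) :
    (PySem.Str.startswith s P = true ↔
     PySem.Str.slice s none (some (PySem.Chars.find s.toList ['-'] + 1)) = P) := by
  have h1 : PySem.Str.startswith s P = true ↔ P.toList <+: s.toList := by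
    simp [PySem.Chars.startswith_iff]
  rw [h1, hP, pv_prefix_iff_key s.toList q hq hf, ← String.toList_inj,
    pv_slice_toList s _ hf, hP]

-- when no hyphen is present, no hyphen-terminated prefix matches
theorem pv_sw_false (l q : List Char)
    (h : PySem.Chars.find l ['-'] = -1) : PySem.Chars.startswith l (q ++ ['-']) = false := by
  rw [← Bool.not_eq_true]
  simpa [PySem.Chars.startswith_iff] using pv_no_hyphen_no_prefix l q h

-- ===== VERDICT (by name: the statement is the Claim_ definition above) =====
theorem auto_detect_spec_type_py_spec : Claim_equal_auto_detect_spec_type_py := by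
  intro spec_id declared_type _
  unfold Spec_auto_detect_spec_type_py auto_detect_spec_type_py auto_detect_spec_type_py_alt
  by_cases hd : declared_type = "requirement"
  case neg => simp [hd]
  subst hd
  have hfind : PySem.Str.find spec_id "-" = PySem.Chars.find spec_id.toList ['-'] := by simp
  simp only [ne_eq, not_true_eq_false, if_false, hfind]
  by_cases hf : PySem.Chars.find spec_id.toList ['-'] = -1
  · have g1 := pv_sw_false spec_id.toList ['G','O','V'] hf
    have g2 := pv_sw_false spec_id.toList ['P','B'] hf
    have g3 := pv_sw_false spec_id.toList ['A','D','R'] hf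
    have g4 := pv_sw_false spec_id.toList ['D','C','L'] hf
    simp only [List.cons_append, List.nil_append] at g1 g2 g3 g4
    simp [hf, g1, g2, g3, g4]
  · have hpos : 0 ≤ PySem.Chars.find spec_id.toList ['-'] := by
      have := PySem.Chars.neg_one_le_find spec_id.toList ['-']
      omega
    have hbe : (PySem.Chars.find spec_id.toList ['-'] == -1) = false := by simpa using hf
    rw [hbe]
    simp only [Bool.false_eq_true, if_false]
    rw [pv_getD_prefix_map]
    simp only [pv_main_iff spec_id "GOV-" ['G','O','V'] (by decide) (by decide) hpos,
      pv_main_iff spec_id "PB-" ['P','B'] (by decide) (by decide) hpos,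
      pv_main_iff spec_id "ADR-" ['A','D','R'] (by decide) (by decide) hpos,
      pv_main_iff spec_id "DCL-" ['D','C','L'] (by decide) (by decide) hpos]
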